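-- pv_equiv track=rewrite | github.com/beenvyn/Algorithm | 프로그래머스/2/72411. 메뉴 리뉴얼/메뉴 리뉴얼.py | solution
-- ===== SOURCE A (Python) =====
-- def solution(orders, course):
--     answer = []
--     menu_cnt = {} # 메뉴 조합 : 주문 수
--
--     def combs(order, length, idx, menu):
--         if len(menu) == length:
--             if menu not in menu_cnt:
--                 menu_cnt[menu] = 0
--             menu_cnt[menu] += 1
--             return
--
--         for i in range(idx, len(order)):
--             combs(order, length, i + 1, menu + order[i])
--
--     for order in orders:
--         order = ''.join(sorted(order)) # 'AC'랑 'CA'를 다르게 보는 것 방지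
--         for length in course:
--             if length <= len(order):
--                 combs(order, length, 0, '')
--
--     for c in course:
--         candidates = [(menu, cnt) for menu, cnt in menu_cnt.items() if len(menu) == c and cnt >= 2]
--         if not candidates:
--             continue
--         max_cnt = max(cnt for menu, cnt in candidates)
--         answer.extend([menu for menu, cnt in candidates if cnt == max_cnt])
--
--     return sorted(answer)
-- ===== SOURCE B (Python) =====
-- def choose(chars, l):
--     # all combinations of l characters of chars (in order), as strings
--     if l == 0:
--         return ['']
--     if not chars:
--         return []
--     rest = chars[1:]
--     return [chars[0] + m for m in choose(rest, l - 1)] + choose(rest, l)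
--
--
-- def solution(orders, course):
--     menu_cnt = {}
--     for order in orders:
--         s = ''.join(sorted(order))
--         for length in course:
--             if length <= len(s):
--                 for menu in choose(s, length):
--                     menu_cnt[menu] = menu_cnt.get(menu, 0) + 1
--     answer = []
--     for c in course:
--         best = 0
--         chosen = []
--         for menu, k in menu_cnt.items():
--             if len(menu) == c and k >= 2:
--                 if k > best:
--                     best = k
--                     chosen = [menu]
--                 elif k == best:
--                     chosen.append(menu)
--         answer += chosen
--     return sorted(answer)
-- ===== Notes on version B (the rewrite author's own statement) =====
-- stated objective: alternative
-- what changed: A's recursive index-DFS closure that mutates the dict in place is replaced by a pure structural-recursion combination generator (recursing on the string, not on indices) whose output list is counted with dict.get, and the per-course filter/max/filter selection is replaced by a single-pass running-max accumulator.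
import Mathlib
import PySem

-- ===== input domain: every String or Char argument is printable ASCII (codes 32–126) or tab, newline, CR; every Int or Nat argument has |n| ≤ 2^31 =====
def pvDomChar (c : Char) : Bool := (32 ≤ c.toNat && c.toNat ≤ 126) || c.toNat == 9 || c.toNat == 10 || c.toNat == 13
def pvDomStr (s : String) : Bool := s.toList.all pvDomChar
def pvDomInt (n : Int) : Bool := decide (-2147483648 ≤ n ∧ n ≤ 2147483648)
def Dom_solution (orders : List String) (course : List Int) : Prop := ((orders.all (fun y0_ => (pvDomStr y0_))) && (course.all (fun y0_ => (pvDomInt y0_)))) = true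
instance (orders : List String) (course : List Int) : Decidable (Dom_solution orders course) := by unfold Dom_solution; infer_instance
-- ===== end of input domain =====

-- B replaces A's recursive index-DFS closure mutating the dict by a pure structural-recursion
-- combination generator counted with dict.get, and the filter/max/filter selection by a
-- single-pass running-max accumulator (objective: alternative, same cost).

-- ===== PORT A =====
mutual
/-- A's nested `combs(order, length, idx, menu)`, the dict `menu_cnt` threaded explicitly. -/
def combsA (order : List Char) (length : Int) (idx : Nat) (menu : List Char)
    (d : PySem.Dict String Int) : PySem.Dict String Int :=
  if (menu.length : Int) = length then
    let m := String.mk menu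
    let d1 := if (d.get? m).isNone then d.insert m 0 else d
    d1.insert m (d1.getD m 0 + 1)
  else
    loopA order length idx menu d
termination_by (order.length + 1 - idx, 1)

/-- the `for i in range(idx, len(order))` loop inside `combs`. -/
def loopA (order : List Char) (length : Int) (i : Nat) (menu : List Char)
    (d : PySem.Dict String Int) : PySem.Dict String Int :=
  if h : i < order.length then
    loopA order length (i + 1) menu (combsA order length (i + 1) (menu ++ [order[i]]) d)
  else d
termination_by (order.length + 1 - i, 0)
end

/-- the first phase of A: build `menu_cnt`. -/
def menuCntA (orders : List String) (course : List Int) : PySem.Dict String Int :=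
  orders.foldl (fun d order =>
    let o := PySem.List.sorted order.toList (fun x => x) false
    course.foldl (fun d length =>
      if length ≤ (o.length : Int) then combsA o length 0 [] d else d) d)
    PySem.Dict.empty

/-- one iteration of A's `for c in course` answer loop. -/
def pickA (d : PySem.Dict String Int) (ans : List String) (c : Int) : List String :=
  let candidates := d.items.filter (fun q => decide (PySem.Str.len q.1 = c ∧ 2 ≤ q.2))
  if candidates.isEmpty then ans
  else
    match PySem.List.max? (candidates.map (·.2)) (fun x => x) with
    | none => ans
    | some max_cnt => ans ++ (candidates.filter (fun q => q.2 == max_cnt)).map (·.1)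

def solution (orders : List String) (course : List Int) : List String :=
  PySem.List.sorted (course.foldl (pickA (menuCntA orders course)) []) (fun x => x) false

-- ===== PORT B =====
/-- B's `choose(chars, l)`: all length-`l` combinations, by structural recursion. -/
def chooseB (chars : List Char) (l : Int) : List (List Char) :=
  if l = 0 then [[]]
  else
    match chars with
    | [] => []
    | c :: rest => (chooseB rest (l - 1)).map (c :: ·) ++ chooseB rest l
termination_by chars.length

/-- B's counting loop: `for menu in …: menu_cnt[menu] = menu_cnt.get(menu, 0) + 1`. -/
def bumpL (d : PySem.Dict String Int) (ms : List (List Char)) : PySem.Dict String Int :=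
  ms.foldl (fun d menu => d.insert (String.mk menu) (d.getD (String.mk menu) 0 + 1)) d

def menuCntB (orders : List String) (course : List Int) : PySem.Dict String Int :=
  orders.foldl (fun d order =>
    let s := PySem.List.sorted order.toList (fun x => x) false
    course.foldl (fun d length =>
      if length ≤ (s.length : Int) then bumpL d (chooseB s length) else d) d)
    PySem.Dict.empty

/-- one iteration of B's answer loop: a single pass keeping (best, chosen). -/
def pickB (d : PySem.Dict String Int) (ans : List String) (c : Int) : List String :=
  let r := d.items.foldl (fun (bc : Int × List String) q =>
    if PySem.Str.len q.1 = c ∧ 2 ≤ q.2 then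
      if bc.1 < q.2 then (q.2, [q.1])
      else if q.2 = bc.1 then (bc.1, bc.2 ++ [q.1])
      else bc
    else bc) (0, [])
  ans ++ r.2

def solution_alt (orders : List String) (course : List Int) : List String :=
  PySem.List.sorted (course.foldl (pickB (menuCntB orders course)) []) (fun x => x) false

-- ===== PRECONDITION & SPEC =====
def Spec_solution (orders : List String) (course : List Int) (out : List String) : Prop := out = solution_alt orders course
instance (orders : List String) (course : List Int) (out : List String) : Decidable (Spec_solution orders course out) := by unfold Spec_solution; infer_instance

-- ===== CLAIM (what is proved, stated in full; the proofs are below) =====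
def Claim_equal_solution : Prop := ∀ (orders : List String) (course : List Int), Dom_solution orders course → Spec_solution orders course (solution orders course)

-- ===== LEMMAS AND PROOFS =====

theorem foldl_ext {α β : Type} (f g : β → α → β) (h : ∀ b a, f b a = g b a) :
    ∀ (l : List α) (b : β), l.foldl f b = l.foldl g b := by
  intro l
  induction l with
  | nil => intro b; rfl
  | cons x t ih => intro b; simp only [List.foldl_cons, h, ih]

theorem bumpL_append (d : PySem.Dict String Int) (xs ys : List (List Char)) :
    bumpL d (xs ++ ys) = bumpL (bumpL d xs) ys := by
  simp only [bumpL, List.foldl_append]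

/-- A's two-step increment equals B's `get`-based one. -/
theorem bumpA_eq (d : PySem.Dict String Int) (m : String) :
    (if (d.get? m).isNone then d.insert m 0 else d).insert m
      ((if (d.get? m).isNone then d.insert m 0 else d).getD m 0 + 1) =
    d.insert m (d.getD m 0 + 1) := by
  by_cases h : (d.get? m).isNone
  · have hnone : d.get? m = none := by
      cases hg : d.get? m with
      | none => rfl
      | some v => rw [hg] at h; simp at h
    rw [if_pos h, PySem.Dict.getD_insert_self, PySem.Dict.insert_insert_self,
      PySem.Dict.getD_of_get?_eq_none d 0 hnone]
  · rw [if_neg h]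

mutual
theorem combsA_eq (order : List Char) (length : Int) (idx : Nat) (menu : List Char)
    (d : PySem.Dict String Int) :
    combsA order length idx menu d =
      bumpL d ((chooseB (order.drop idx) (length - menu.length)).map (menu ++ ·)) := by
  rw [combsA]
  by_cases h : (menu.length : Int) = length
  · rw [if_pos h]
    have h0 : length - (menu.length : Int) = 0 := by omega
    rw [h0, chooseB.eq_def, bumpA_eq]
    simp [bumpL]
  · rw [if_neg h]
    exact loopA_eq order length idx menu d h
termination_by (order.length + 1 - idx, 1)

theorem loopA_eq (order : List Char) (length : Int) (i : Nat) (menu : List Char)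
    (d : PySem.Dict String Int) (h : (menu.length : Int) ≠ length) :
    loopA order length i menu d =
      bumpL d ((chooseB (order.drop i) (length - menu.length)).map (menu ++ ·)) := by
  have hl' : length - (menu.length : Int) ≠ 0 := by omega
  rw [loopA]
  by_cases hi : i < order.length
  · rw [dif_pos hi]
    rw [combsA_eq order length (i + 1) (menu ++ [order[i]]) d]
    rw [loopA_eq order length (i + 1) menu _ h]
    have hlen : length - (((menu ++ [order[i]]).length : Nat) : Int) =
        length - (menu.length : Int) - 1 := by
      simp only [List.length_append, List.length_cons, List.length_nil]
      push_cast
      ring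
    rw [hlen, List.drop_eq_getElem_cons hi]
    conv_rhs => rw [chooseB.eq_def]
    simp only [if_neg hl', List.map_append, bumpL_append, List.map_map]
    congr 3
    funext x
    simp
  · rw [dif_neg hi]
    have hdrop : order.drop i = [] := List.drop_eq_nil_of_le (by omega)
    rw [hdrop, chooseB.eq_def]
    simp only [if_neg hl']
    rfl
termination_by (order.length + 1 - i, 0)
end

theorem menuCnt_eq (orders : List String) (course : List Int) :
    menuCntA orders course = menuCntB orders course := by
  unfold menuCntA menuCntB
  apply foldl_ext
  intro d order
  apply foldl_ext
  intro d' length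
  by_cases hle : length ≤ ((PySem.List.sorted order.toList (fun x => x) false).length : Int)
  · rw [if_pos hle, if_pos hle, combsA_eq]
    simp only [List.drop_zero, List.length_nil, Nat.cast_zero, sub_zero, List.nil_append,
      List.map_id']
  · rw [if_neg hle, if_neg hle]

-- selection-phase lemmas

theorem foldlmax_ge_init (t : List (String × Int)) :
    ∀ b : Int, b ≤ t.foldl (fun m q => max m q.2) b := by
  induction t with
  | nil => intro b; simp
  | cons q t ih =>
    intro b
    calc b ≤ max b q.2 := le_max_left _ _
    _ ≤ t.foldl (fun m q => max m q.2) (max b q.2) := ih _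

/-- B's guarded pass over all items equals the pass over the filtered items. -/
theorem sel_filter (c : Int) :
    ∀ (cs : List (String × Int)) (bc : Int × List String),
      cs.foldl (fun (bc : Int × List String) q =>
        if PySem.Str.len q.1 = c ∧ 2 ≤ q.2 then
          if bc.1 < q.2 then (q.2, [q.1])
          else if q.2 = bc.1 then (bc.1, bc.2 ++ [q.1])
          else bc
        else bc) bc =
      (cs.filter (fun q => decide (PySem.Str.len q.1 = c ∧ 2 ≤ q.2))).foldl
        (fun (bc : Int × List String) q =>
          if bc.1 < q.2 then (q.2, [q.1])
          else if q.2 = bc.1 then (bc.1, bc.2 ++ [q.1])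
          else bc) bc := by
  intro cs
  induction cs with
  | nil => intro bc; rfl
  | cons q t ih =>
    intro bc
    by_cases hp : PySem.Str.len q.1 = c ∧ 2 ≤ q.2
    · rw [List.foldl_cons, if_pos hp, List.filter_cons_of_pos (by simpa using hp),
        List.foldl_cons, ih]
    · rw [List.foldl_cons, if_neg hp, List.filter_cons_of_neg (by simpa using hp), ih]

/-- the running-max pass computes (max count, its menus in encounter order). -/
theorem sel_run :
    ∀ (cs : List (String × Int)) (b : Int) (ch : List String),
      (∀ q ∈ cs, 2 ≤ q.2) → ((b = 0 ∧ ch = []) ∨ 2 ≤ b) →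
      cs.foldl (fun (bc : Int × List String) q =>
          if bc.1 < q.2 then (q.2, [q.1])
          else if q.2 = bc.1 then (bc.1, bc.2 ++ [q.1])
          else bc) (b, ch) =
        (cs.foldl (fun m q => max m q.2) b,
         (if b = cs.foldl (fun m q => max m q.2) b then ch else []) ++
           (cs.filter (fun q => q.2 == cs.foldl (fun m q => max m q.2) b)).map (·.1)) := by
  intro cs
  induction cs with
  | nil => intro b ch _ _; simp
  | cons q t ih =>
    intro b ch hall hb
    have hq2 : 2 ≤ q.2 := hall q (List.mem_cons_self ..)
    have hallt : ∀ p ∈ t, 2 ≤ p.2 := fun p hp => hall p (List.mem_cons_of_mem _ hp)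
    simp only [List.foldl_cons]
    by_cases h1 : b < q.2
    · have hbM : b ≠ t.foldl (fun m q => max m q.2) q.2 := by
        have := foldlmax_ge_init t q.2
        omega
      rw [if_pos h1, ih q.2 [q.1] hallt (Or.inr hq2)]
      simp only [max_eq_right h1.le]
      rw [if_neg hbM, List.filter_cons]
      by_cases hqM : q.2 = t.foldl (fun m q => max m q.2) q.2
      · rw [if_pos hqM, if_pos (by simpa using hqM)]
        simp
      · rw [if_neg hqM, if_neg (by simpa using hqM)]
    · rw [if_neg h1]
      by_cases h2 : q.2 = b
      · have hb2 : (2:Int) ≤ b := h2 ▸ hq2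
        rw [if_pos h2, ih b (ch ++ [q.1]) hallt (Or.inr hb2)]
        simp only [max_eq_left (show q.2 ≤ b by omega)]
        rw [List.filter_cons]
        by_cases hbM : b = t.foldl (fun m q => max m q.2) b
        · rw [if_pos hbM, if_pos hbM, if_pos (by simp only [h2, beq_iff_eq]; exact hbM)]
          simp
        · rw [if_neg hbM, if_neg hbM,
            if_neg (by simp only [beq_iff_eq, h2]; exact hbM)]
      · have hb2 : (2:Int) ≤ b := by omega
        have hqM : q.2 ≠ t.foldl (fun m q => max m q.2) b := by
          have := foldlmax_ge_init t b
          omega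
        rw [if_neg h2, ih b ch hallt (Or.inr hb2)]
        simp only [max_eq_left (show q.2 ≤ b by omega)]
        rw [List.filter_cons,
          if_neg (show ¬((q.2 == List.foldl (fun m q => max m q.2) b t) = true) from by
            simpa using hqM)]

theorem pick_eq (d : PySem.Dict String Int) (ans : List String) (c : Int) :
    pickA d ans c = pickB d ans c := by
  simp only [pickA, pickB]
  rw [sel_filter]
  have hall : ∀ q ∈ d.items.filter (fun q => decide (PySem.Str.len q.1 = c ∧ 2 ≤ q.2)),
      (2:Int) ≤ q.2 := by
    intro q hq
    have := List.of_mem_filter hq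
    simp only [decide_eq_true_eq] at this
    exact this.2
  set cands := d.items.filter (fun q => decide (PySem.Str.len q.1 = c ∧ 2 ≤ q.2)) with hc
  clear_value cands
  rw [sel_run cands 0 [] hall (Or.inl ⟨rfl, rfl⟩)]
  cases cands with
  | nil => simp
  | cons q t =>
    have hq2 : (2:Int) ≤ q.2 := hall q (List.mem_cons_self ..)
    have hM : (2:Int) ≤ t.foldl (fun m q => max m q.2) q.2 :=
      le_trans hq2 (foldlmax_ge_init t q.2)
    have hmax0 : max (0:Int) q.2 = q.2 := max_eq_right (by omega)
    simp only [List.isEmpty_cons, List.map_cons, PySem.List.max?_id_cons, List.foldl_cons,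
      List.foldl_map, hmax0]
    have h0M : (0:Int) ≠ t.foldl (fun m q => max m q.2) q.2 := by omega
    simp [h0M]

-- ===== VERDICT (by name: the statement is the Claim_ definition above) =====
theorem solution_spec : Claim_equal_solution := by
  intro orders course _
  unfold Spec_solution solution solution_alt
  rw [menuCnt_eq]
  congr 1
  exact foldl_ext _ _ (pick_eq _) course []
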